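-- pv_equiv track=rewrite | github.com/Mattiaaa97/Python-journey-2024 | 04_Funzioni_Def_e_Cifratura.py.py | rimuovi_parole
-- ===== SOURCE A (Python) =====
-- def rimuovi_parole(frase: str, lettera: str):
--     i: int = 0
--     new: str = ""
--     parola: str = ""
--     while i < len(frase):
--         if frase[i] != " ":
--             parola += frase[i]
--         else:
--             if lettera.lower() not in parola.lower():
--                 new += parola + " "
--             parola: str = ""
--         i += 1
--     if parola != "" and lettera.lower() not in parola.lower():
--         new += parola
--     return new.strip()
-- ===== SOURCE B (Python) =====
-- def rimuovi_parole(frase: str, lettera: str):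
--     parole = frase.split(" ")
--     tenute = [p for p in parole if lettera.lower() not in p.lower()]
--     return " ".join(tenute).strip()
-- ===== Notes on version B (the rewrite author's own statement) =====
-- stated objective: faster
-- what changed: Replaced A's char-by-char while-loop with manual word accumulation and quadratic 'new +=' string concatenation by a split(" ") -> list-comprehension filter -> " ".join(...).strip() pipeline over whole words.
import Mathlib
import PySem

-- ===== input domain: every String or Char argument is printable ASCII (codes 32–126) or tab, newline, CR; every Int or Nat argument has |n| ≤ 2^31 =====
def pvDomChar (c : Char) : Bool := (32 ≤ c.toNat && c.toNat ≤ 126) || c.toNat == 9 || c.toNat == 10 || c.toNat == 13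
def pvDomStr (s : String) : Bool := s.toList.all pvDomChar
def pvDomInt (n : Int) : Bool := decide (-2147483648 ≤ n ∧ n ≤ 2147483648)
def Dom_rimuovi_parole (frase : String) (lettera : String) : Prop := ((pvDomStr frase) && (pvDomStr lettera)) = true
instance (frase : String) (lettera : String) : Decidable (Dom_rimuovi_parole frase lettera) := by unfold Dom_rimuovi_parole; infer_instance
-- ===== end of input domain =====

-- B replaces A's char-by-char tokenizing while-loop (with its quadratic 'new +=' string accumulation) by a split(" ") → filter → " ".join(…).strip() pipeline, measured faster; return value proved equal on all inputs.


-- ===== PORT A =====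
-- the while-loop of A: state (new, parola), one step per character of frase
def rimuoviGoA (lett : List Char) : List Char → List Char → List Char → List Char
  | [], new, parola =>
      -- 'if parola != "" and lettera.lower() not in parola.lower(): new += parola'
      if parola ≠ [] ∧ PySem.Chars.isIn (PySem.Chars.lower lett) (PySem.Chars.lower parola) = false
      then new ++ parola else new
  | c :: cs, new, parola =>
      if c ≠ ' ' then rimuoviGoA lett cs new (parola ++ [c])
      else if PySem.Chars.isIn (PySem.Chars.lower lett) (PySem.Chars.lower parola) = false
      then rimuoviGoA lett cs (new ++ parola ++ [' ']) []
      else rimuoviGoA lett cs new []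

def rimuovi_parole (frase : String) (lettera : String) : String :=
  String.ofList (PySem.Chars.strip (rimuoviGoA lettera.toList frase.toList [] []))

-- ===== PORT B =====
def rimuovi_parole_alt (frase : String) (lettera : String) : String :=
  let parole := PySem.Chars.splitOn frase.toList [' ']
  let tenute := parole.filter
    (fun p => PySem.Chars.isIn (PySem.Chars.lower lettera.toList) (PySem.Chars.lower p) = false)
  String.ofList (PySem.Chars.strip (PySem.Chars.join [' '] tenute))

-- ===== PRECONDITION & SPEC =====
def Spec_rimuovi_parole (frase : String) (lettera : String) (out : String) : Prop := out = rimuovi_parole_alt frase lettera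
instance (frase : String) (lettera : String) (out : String) : Decidable (Spec_rimuovi_parole frase lettera out) := by unfold Spec_rimuovi_parole; infer_instance

-- ===== CLAIM (what is proved, stated in full; the proofs are below) =====
def Claim_equal_rimuovi_parole : Prop := ∀ (frase : String) (lettera : String), Dom_rimuovi_parole frase lettera → Spec_rimuovi_parole frase lettera (rimuovi_parole frase lettera)

-- ===== LEMMAS AND PROOFS =====

-- keep predicate of both programs: lettera.lower() not in p.lower()
def pvOk (lett p : List Char) : Bool :=
  !PySem.Chars.isIn (PySem.Chars.lower lett) (PySem.Chars.lower p)

-- split on a single space, with the word accumulated so far as prefix of the first token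
def pvS : List Char → List Char → List (List Char)
  | parola, [] => [parola]
  | parola, c :: cs => if c = ' ' then parola :: pvS [] cs else pvS (parola ++ [c]) cs

-- what A's loop appends to new, as a function of the token list
def pvF (lett : List Char) : List (List Char) → List Char
  | [] => []
  | [t] => if t ≠ [] ∧ pvOk lett t = true then t else []
  | t :: t' :: ts => (if pvOk lett t = true then t ++ [' '] else []) ++ pvF lett (t' :: ts)

theorem pvS_ne_nil (parola cs : List Char) : ∃ x xs, pvS parola cs = x :: xs := by
  induction cs generalizing parola with
  | nil => exact ⟨parola, [], rfl⟩
  | cons c cs ih =>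
    by_cases h : c = ' '
    · exact ⟨parola, pvS [] cs, by simp [pvS, h]⟩
    · obtain ⟨x, xs, hx⟩ := ih (parola ++ [c])
      exact ⟨x, xs, by simp [pvS, h, hx]⟩

theorem rimuoviGoA_spec (lett cs new parola : List Char) :
    rimuoviGoA lett cs new parola = new ++ pvF lett (pvS parola cs) := by
  induction cs generalizing new parola with
  | nil =>
    simp only [rimuoviGoA, pvS, pvF]
    split_ifs with h h2 h2 <;> simp_all [pvOk]
  | cons c cs ih =>
    by_cases hc : c = ' '
    · subst hc
      obtain ⟨x, xs, hx⟩ := pvS_ne_nil ([] : List Char) cs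
      have hstep : pvF lett (pvS parola (' ' :: cs)) =
          (if pvOk lett parola = true then parola ++ [' '] else []) ++ pvF lett (pvS [] cs) := by
        rw [show pvS parola (' ' :: cs) = parola :: pvS [] cs from by simp [pvS], hx]
        rw [pvF, ← hx]
      rw [hstep]
      by_cases hk : pvOk lett parola = true
      · have hk' : PySem.Chars.isIn (PySem.Chars.lower lett) (PySem.Chars.lower parola) = false := by
          simpa [pvOk] using hk
        rw [show rimuoviGoA lett (' ' :: cs) new parola =
            rimuoviGoA lett cs (new ++ parola ++ [' ']) [] from by
          simp [rimuoviGoA, hk']]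
        rw [ih]
        simp [hk]
      · have hk' : PySem.Chars.isIn (PySem.Chars.lower lett) (PySem.Chars.lower parola) = true := by
          simpa [pvOk] using hk
        rw [show rimuoviGoA lett (' ' :: cs) new parola = rimuoviGoA lett cs new [] from by
          simp [rimuoviGoA, hk']]
        rw [ih]
        simp [hk]
    · simp only [rimuoviGoA]
      rw [if_pos (by simpa using hc), ih, pvS, if_neg hc]

-- PySem.Chars.splitOn with separator " " is pvS with empty accumulator
theorem splitOn_go_space (fuel : Nat) (l cur : List Char) (accs : List (List Char))
    (h : l.length < fuel) :
    PySem.Chars.splitOn.go [' '] fuel l cur accs = accs.reverse ++ pvS cur.reverse l := by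
  induction fuel generalizing l cur accs with
  | zero => omega
  | succ fuel ih =>
    cases l with
    | nil => simp [PySem.Chars.splitOn.go, pvS]
    | cons c rest =>
      by_cases hc : c = ' '
      · subst hc
        have hpre : ([' '] : List Char).isPrefixOf (' ' :: rest) = true := by
          simp [List.isPrefixOf]
        rw [PySem.Chars.splitOn.go]
        simp only [hpre, if_pos, List.length_cons, List.length_nil, List.drop_succ_cons,
          List.drop_zero]
        rw [ih rest [] (cur.reverse :: accs) (by simpa using Nat.lt_of_succ_lt_succ h)]
        simp [pvS]
      · have hpre : ([' '] : List Char).isPrefixOf (c :: rest) = false := by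
          simp [List.isPrefixOf]; exact fun a => absurd a.symm hc
        rw [PySem.Chars.splitOn.go]
        simp only [hpre, Bool.false_eq_true, if_false]
        rw [ih rest (c :: cur) accs (by simpa using Nat.lt_of_succ_lt_succ h)]
        simp [pvS, hc]

theorem splitOn_space (s : List Char) : PySem.Chars.splitOn s [' '] = pvS [] s := by
  rw [PySem.Chars.splitOn, splitOn_go_space (s.length + 1) s [] [] (by omega)]
  simp

-- the empty-accumulator case is unused below; kept lemmas minimal
theorem pvF_of_filter_nil (lett : List Char) (toks : List (List Char))
    (h : toks.filter (pvOk lett) = []) : pvF lett toks = [] := by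
  induction toks with
  | nil => rfl
  | cons t ts ih =>
    have ht : pvOk lett t = false := by
      rcases Bool.eq_false_or_eq_true (pvOk lett t) with h' | h'
      · simp [h'] at h
      · exact h'
    have hts : ts.filter (pvOk lett) = [] := by
      simpa [List.filter_cons, ht] using h
    cases ts with
    | nil => simp [pvF, ht]
    | cons t' ts' => simp [pvF, ht, ih hts]

theorem pvF_eq_join_or (lett : List Char) (toks : List (List Char)) :
    pvF lett toks = PySem.Chars.join [' '] (toks.filter (pvOk lett)) ∨
    pvF lett toks = PySem.Chars.join [' '] (toks.filter (pvOk lett)) ++ [' '] := by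
  induction toks with
  | nil => left; rfl
  | cons t ts ih =>
    cases ts with
    | nil =>
      by_cases hk : pvOk lett t = true
      · by_cases ht : t = ([] : List Char)
        · left; subst ht
          simp [pvF, hk]
        · left; simp [pvF, ht, hk, PySem.Chars.join_singleton]
      · have hk' : pvOk lett t = false := by simpa using hk
        left; simp [pvF, hk']
    | cons t' ts' =>
      by_cases hk : pvOk lett t = true
      · rcases hfil : (t' :: ts').filter (pvOk lett) with _ | ⟨r, rs⟩
        · right
          have hF : pvF lett (t' :: ts') = [] := pvF_of_filter_nil lett _ hfil
          simp [pvF, hk, hF, hfil, PySem.Chars.join_singleton]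
        · have hjoin : PySem.Chars.join [' '] (t :: r :: rs) =
              t ++ [' '] ++ PySem.Chars.join [' '] (r :: rs) :=
            PySem.Chars.join_cons_cons _ _ _ _
          rcases ih with h | h
          · left
            simp [pvF, hk, h, hfil, hjoin]
          · right
            simp [pvF, hk, h, hfil, hjoin]
      · have hk' : pvOk lett t = false := by simpa using hk
        simpa [pvF, hk', List.filter_cons] using ih

theorem strip_append_space (x : List Char) :
    PySem.Chars.strip (x ++ [' ']) = PySem.Chars.strip x := by
  rcases hl : List.dropWhile PySem.Chars.isspace x with _ | ⟨y, ys⟩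
  · simp [PySem.Chars.strip, PySem.Chars.lstrip, PySem.Chars.rstrip, List.dropWhile_append, hl,
      PySem.Chars.isspace]
  · simp [PySem.Chars.strip, PySem.Chars.lstrip, PySem.Chars.rstrip, List.dropWhile_append, hl,
      PySem.Chars.isspace]

-- ===== VERDICT (by name: the statement is the Claim_ definition above) =====
theorem rimuovi_parole_spec : Claim_equal_rimuovi_parole := by
  intro frase lettera _
  unfold Spec_rimuovi_parole rimuovi_parole rimuovi_parole_alt
  rw [rimuoviGoA_spec, splitOn_space]
  have hfeq :
      List.filter
        (fun p => decide (PySem.Chars.isIn (PySem.Chars.lower lettera.toList) (PySem.Chars.lower p) = false))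
        (pvS [] frase.toList) = List.filter (pvOk lettera.toList) (pvS [] frase.toList) :=
    List.filter_congr (fun p _ => by simp [pvOk])
  simp only [List.nil_append, hfeq]
  rcases pvF_eq_join_or lettera.toList (pvS [] frase.toList) with h | h <;>
    simp [h, strip_append_space]
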